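-- pv_equiv track=rewrite | github.com/xlan156/verl-agent | agent_system/environments/env_package/discovery/projection2.py | _count_top_level_json_objects
-- ===== SOURCE A (Python) =====
-- def _count_top_level_json_objects(text: str) -> int:
--     """Count complete top-level {...} JSON objects in text.
--
--     This is a lightweight heuristic used to detect when the model emitted multiple
--     JSON action objects inside a single <action>...</action> block.
--     """
--     if not text:
--         return 0
--
--     depth = 0
--     in_str = False
--     escape = False
--     count = 0
--
--     for ch in text:
--         if in_str:
--             if escape:
--                 escape = False
--             elif ch == "\\":
--                 escape = True
--             elif ch == '"':
--                 in_str = False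
--             continue
--
--         if ch == '"':
--             in_str = True
--             continue
--
--         if ch == "{":
--             depth += 1
--         elif ch == "}":
--             if depth > 0:
--                 depth -= 1
--                 if depth == 0:
--                     count += 1
--
--     return count
-- ===== SOURCE B (Python) =====
-- def _count_top_level_json_objects(text: str) -> int:
--     """Two-pass: strip string literals, then count depth-0 closings."""
--     structural = []
--     in_str = False
--     escape = False
--     for ch in text:
--         if in_str:
--             if escape:
--                 escape = False
--             elif ch == "\\":
--                 escape = True
--             elif ch == '"':
--                 in_str = False
--         elif ch == '"':
--             in_str = True
--         else:
--             structural.append(ch)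
--
--     depth = 0
--     count = 0
--     for ch in structural:
--         if ch == "{":
--             depth += 1
--         elif ch == "}":
--             if depth > 0:
--                 depth -= 1
--                 if depth == 0:
--                     count += 1
--     return count
-- ===== Notes on version B (the rewrite author's own statement) =====
-- stated objective: alternative
-- what changed: Replaces A's single intertwined state machine with a two-pass decomposition: a first pass strips quoted string content (with escape handling) producing the structural characters, and a second pass counts objects with only a depth counter.
import Mathlib
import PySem

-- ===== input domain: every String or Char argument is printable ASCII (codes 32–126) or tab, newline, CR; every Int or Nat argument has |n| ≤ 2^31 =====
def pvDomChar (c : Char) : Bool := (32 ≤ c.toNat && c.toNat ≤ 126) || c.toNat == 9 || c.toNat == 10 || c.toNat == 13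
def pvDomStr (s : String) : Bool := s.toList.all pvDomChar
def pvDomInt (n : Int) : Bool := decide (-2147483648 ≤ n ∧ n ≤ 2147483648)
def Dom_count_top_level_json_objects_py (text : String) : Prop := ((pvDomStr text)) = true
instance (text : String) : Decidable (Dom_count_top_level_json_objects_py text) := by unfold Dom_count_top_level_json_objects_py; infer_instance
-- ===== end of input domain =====

-- B: two-pass decomposition (strip string literals, then count with a depth counter) instead of A's single intertwined state machine; same O(n) cost.


-- ===== PORT A =====
def pvALoop : List Char → Int → Bool → Bool → Int → Int
  | [], _depth, _in_str, _escape, count => count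
  | ch :: rest, depth, in_str, escape, count =>
    if in_str then
      if escape then pvALoop rest depth in_str false count
      else if ch == '\\' then pvALoop rest depth in_str true count
      else if ch == '"' then pvALoop rest depth false escape count
      else pvALoop rest depth in_str escape count
    else if ch == '"' then pvALoop rest depth true escape count
    else if ch == '{' then pvALoop rest (depth + 1) in_str escape count
    else if ch == '}' then
      if depth > 0 then
        if depth - 1 == 0 then pvALoop rest (depth - 1) in_str escape (count + 1)
        else pvALoop rest (depth - 1) in_str escape count
      else pvALoop rest depth in_str escape count
    else pvALoop rest depth in_str escape count

def count_top_level_json_objects_py (text : String) : Int :=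
  if text.toList = [] then 0
  else pvALoop text.toList 0 false false 0

-- ===== PORT B =====
-- first pass: drop quoted-string content (with escape handling), keep structural chars
def pvStrip : List Char → Bool → Bool → List Char
  | [], _in_str, _escape => []
  | ch :: rest, in_str, escape =>
    if in_str then
      if escape then pvStrip rest in_str false
      else if ch == '\\' then pvStrip rest in_str true
      else if ch == '"' then pvStrip rest false escape
      else pvStrip rest in_str escape
    else if ch == '"' then pvStrip rest true escape
    else ch :: pvStrip rest in_str escape

-- second pass: depth counter only
def pvCount : List Char → Int → Int → Int
  | [], _depth, count => count
  | ch :: rest, depth, count =>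
    if ch == '{' then pvCount rest (depth + 1) count
    else if ch == '}' then
      if depth > 0 then
        if depth - 1 == 0 then pvCount rest (depth - 1) (count + 1)
        else pvCount rest (depth - 1) count
      else pvCount rest depth count
    else pvCount rest depth count

def count_top_level_json_objects_py_alt (text : String) : Int :=
  pvCount (pvStrip text.toList false false) 0 0

-- ===== PRECONDITION & SPEC =====
def Spec_count_top_level_json_objects_py (text : String) (out : Int) : Prop := out = count_top_level_json_objects_py_alt text
instance (text : String) (out : Int) : Decidable (Spec_count_top_level_json_objects_py text out) := by unfold Spec_count_top_level_json_objects_py; infer_instance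

-- ===== CLAIM (what is proved, stated in full; the proofs are below) =====
def Claim_equal_count_top_level_json_objects_py : Prop := ∀ (text : String), Dom_count_top_level_json_objects_py text → Spec_count_top_level_json_objects_py text (count_top_level_json_objects_py text)

-- ===== LEMMAS AND PROOFS =====
theorem pvCount_pvStrip (l : List Char) : ∀ (in_str escape : Bool) (depth count : Int),
    pvCount (pvStrip l in_str escape) depth count = pvALoop l depth in_str escape count := by
  induction l with
  | nil => intro _ _ _ _; rfl
  | cons ch rest ih =>
    intro in_str escape depth count
    simp only [pvStrip, pvALoop]
    by_cases h1 : in_str <;> simp [h1] <;> split_ifs <;> simp [pvCount, *]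

-- ===== VERDICT (by name: the statement is the Claim_ definition above) =====
theorem count_top_level_json_objects_py_spec : Claim_equal_count_top_level_json_objects_py := by
  intro text _
  show count_top_level_json_objects_py text = count_top_level_json_objects_py_alt text
  unfold count_top_level_json_objects_py count_top_level_json_objects_py_alt
  rcases h : text.toList with _ | ⟨c, rest⟩
  · simp [pvStrip, pvCount]
  · simp [pvCount_pvStrip]
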